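-- pv_equiv track=rewrite | github.com/blacksmithalex/leetcode | Algorithms/medium/2405. Optimal Partition of String.py | f
-- ===== SOURCE A (Python) =====
-- def f(n):
--     digits = [int(x) for x in str(n)]
--     if (0 in digits) or (len(set(digits)) != len(digits)):
--         return False
--     for d in digits:
--         if n % d != 0:
--             return False
--     return True
-- ===== SOURCE B (Python) =====
-- def f(n):
--     # Arithmetic digit extraction (divmod), a bitmask for zero/duplicate digits,
--     # and a running lcm so all per-digit divisibility tests collapse into a single final modulo.
--     mask = 0
--     l = 1
--     m = n
--     while True:
--         m, d = divmod(m, 10)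
--         if d == 0 or mask & (1 << d):
--             return False
--         mask |= 1 << d
--         g, x = l, d
--         while x:
--             g, x = x, g % x
--         l = l * d // g
--         if m == 0:
--             break
--     return n % l == 0
-- ===== Notes on version B (the rewrite author's own statement) =====
-- stated objective: alternative
-- what changed: B replaces A's string conversion, list/set comparison and per-digit divisibility loop with arithmetic divmod digit extraction, a bitmask for zero/duplicate digits, and a running lcm (Euclid gcd) so divisibility is one final modulo-by-the-lcm test.
import Mathlib
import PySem

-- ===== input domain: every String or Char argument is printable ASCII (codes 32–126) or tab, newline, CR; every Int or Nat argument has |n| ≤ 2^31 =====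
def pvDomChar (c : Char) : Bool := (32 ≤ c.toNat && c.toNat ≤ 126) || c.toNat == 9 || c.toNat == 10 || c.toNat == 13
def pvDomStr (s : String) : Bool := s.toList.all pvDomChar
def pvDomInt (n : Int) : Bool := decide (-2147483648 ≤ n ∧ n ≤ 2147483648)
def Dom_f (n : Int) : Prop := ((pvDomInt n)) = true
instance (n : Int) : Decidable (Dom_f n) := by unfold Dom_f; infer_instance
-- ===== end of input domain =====

-- B swaps A's string/list/set approach for arithmetic divmod digit extraction, a duplicate
-- bitmask and a running lcm checked once at the end; same cost class, no speed claim.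

-- ===== PORT A =====
-- int(x) for a one-character string x; exact on decimal digit characters. On any other char
-- (the sign of a negative n) Python's int(x) raises ValueError — excluded by Pre_f.
def digitVal (c : Char) : Int := (c.toNat : Int) - 48

def f (n : Int) : Bool :=
  let digits := (PySem.Int.toStr n).toList.map digitVal
  if digits.contains 0 || ((PySem.Set.ofList digits).length != digits.length) then false
  else digits.all (fun d => PySem.Int.mod n d == 0)

-- ===== PORT B =====
-- Euclid's inner loop 'while x: g, x = x, g % x'; terminates since |g % x| < |x| for x ≠ 0.
def gcdLoop (g x : Int) : Int :=
  if hx : x = 0 then g else gcdLoop x (PySem.Int.mod g x)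
termination_by x.natAbs
decreasing_by
  rcases lt_or_gt_of_ne hx with h | h
  · have h1 := PySem.Int.mod_neg_bounds g h
    omega
  · have h1 := PySem.Int.mod_nonneg g h
    have h2 := PySem.Int.mod_lt g h
    omega

-- The 'while True' loop of Source B, fueled (f_alt passes enough fuel for every n; 0 fuel is
-- unreachable there).  d = m % 10 is always in 0..9, so 'd.toNat' in '1 << d' is exact.
def fAltGo (n : Int) : Nat → Int → Int → Int → Bool
  | 0, _, _, _ => false
  | fuel+1, mask, l, m =>
    let q := PySem.Int.floordiv m 10
    let d := PySem.Int.mod m 10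
    if d == 0 || PySem.Int.band mask ((1:Int) <<< d.toNat) != 0 then false
    else
      let mask' := PySem.Int.bor mask ((1:Int) <<< d.toNat)
      let g := gcdLoop l d
      let l' := PySem.Int.floordiv (l * d) g
      if q == 0 then decide (PySem.Int.mod n l' = 0)
      else fAltGo n fuel mask' l' q

def f_alt (n : Int) : Bool := fAltGo n (n.natAbs + 1) 0 1 n

-- ===== PRECONDITION & SPEC =====
-- Pre_f excludes exactly the inputs on which A raises: for negative n, str(n) starts with
-- the sign character, and int() of that character raises ValueError.
def Pre_f (n : Int) : Prop := 0 ≤ n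
instance (n : Int) : Decidable (Pre_f n) := by unfold Pre_f; infer_instance
def pvWitness_f : Int := 128

def Spec_f (n : Int) (out : Bool) : Prop := out = f_alt n
instance (n : Int) (out : Bool) : Decidable (Spec_f n out) := by unfold Spec_f; infer_instance

-- ===== CLAIM (what is proved, stated in full; the proofs are below) =====
def Claim_equal_f : Prop := ∀ (n : Int), Dom_f n → Pre_f n → Spec_f n (f n)

-- ===== LEMMAS AND PROOFS =====

-- ---- A-side characterisation (set-length = nodup, then membership conditions) ----

theorem foldl_add_length_le (xs : List Int) : ∀ s : List Int,
    (xs.foldl PySem.Set.add s).length ≤ s.length + xs.length := by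
  induction xs with
  | nil => intro s; simp
  | cons x xs ih =>
    intro s
    simp only [List.foldl_cons, List.length_cons]
    refine le_trans (ih _) ?_
    have : (PySem.Set.add s x).length ≤ s.length + 1 := by
      simp only [PySem.Set.add]
      split <;> simp
    omega

theorem foldl_add_length_eq_iff (xs : List Int) : ∀ s : List Int,
    ((xs.foldl PySem.Set.add s).length = s.length + xs.length) ↔
      (xs.Nodup ∧ ∀ x ∈ xs, x ∉ s) := by
  induction xs with
  | nil => intro s; simp
  | cons x xs ih =>
    intro s
    simp only [List.foldl_cons]
    by_cases hx : x ∈ s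
    · have hadd : PySem.Set.add s x = s := by
        simp [PySem.Set.add, PySem.Set.contains_eq_listContains, hx]
      rw [hadd]
      constructor
      · intro h
        have := foldl_add_length_le xs s
        simp at h; omega
      · rintro ⟨-, h2⟩
        exact absurd hx (h2 x (by simp))
    · have hadd : PySem.Set.add s x = s ++ [x] := by
        simp [PySem.Set.add, PySem.Set.contains_eq_listContains, hx]
      have hlen : s.length + (x :: xs).length = (s ++ [x]).length + xs.length := by
        simp; omega
      rw [hadd, hlen, ih (s ++ [x])]
      constructor
      · rintro ⟨hnd, h⟩
        refine ⟨List.nodup_cons.mpr ⟨fun hxm => h x hxm (by simp), hnd⟩, ?_⟩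
        intro y hy
        rcases List.mem_cons.mp hy with rfl | hy'
        · exact hx
        · intro hys; exact h y hy' (by simp [hys])
      · rintro ⟨hnd, h⟩
        have hcn := List.nodup_cons.mp hnd
        refine ⟨hcn.2, ?_⟩
        intro y hy hmem
        rcases List.mem_append.mp hmem with hys | hyx
        · exact h y (List.mem_cons_of_mem _ hy) hys
        · exact hcn.1 ((List.mem_singleton.mp hyx) ▸ hy)

theorem ofList_length_iff (xs : List Int) :
    (PySem.Set.ofList xs).length = xs.length ↔ xs.Nodup := by
  rw [PySem.Set.ofList_eq_foldl]
  have := foldl_add_length_eq_iff xs []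
  simpa using this

theorem f_eq_true_iff (n : Int) :
    f n = true ↔
      ((PySem.Int.toStr n).toList.map digitVal).Nodup ∧
      ∀ d ∈ (PySem.Int.toStr n).toList.map digitVal, d ≠ 0 ∧ PySem.Int.mod n d = 0 := by
  unfold f
  set ds := (PySem.Int.toStr n).toList.map digitVal with hds
  simp
  constructor
  · rintro ⟨⟨h0, hlen⟩, h⟩
    exact ⟨(ofList_length_iff ds).mp hlen, fun d hd => ⟨fun he => h0 (he ▸ hd), h d hd⟩⟩
  · rintro ⟨hnd, h⟩
    exact ⟨⟨fun h0 => (h 0 h0).1 rfl, (ofList_length_iff ds).mpr hnd⟩, fun d hd => (h d hd).2⟩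

-- ---- str(n) digits vs Nat.digits ----

theorem digitVal_digitChar (d : Nat) (h : d < 10) : digitVal (Nat.digitChar d) = (d : Int) := by
  interval_cases d <;> decide

theorem toDigitsCore_eq : ∀ (fuel n : Nat) (acc : List Char), 0 < n → n < fuel →
    Nat.toDigitsCore 10 fuel n acc = ((Nat.digits 10 n).map Nat.digitChar).reverse ++ acc := by
  intro fuel
  induction fuel with
  | zero => intro n acc h0 hlt; omega
  | succ fuel ih =>
    intro n acc h0 hlt
    rw [Nat.toDigitsCore]
    by_cases hq : n / 10 = 0
    · rw [if_pos hq, Nat.digits_def' (by norm_num) h0, hq, Nat.digits_zero]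
      simp
    · rw [if_neg hq]
      have hpos : 0 < n / 10 := Nat.pos_of_ne_zero hq
      have hdec : n / 10 < fuel := by
        have := Nat.div_lt_self h0 (by norm_num : (1:Nat) < 10)
        omega
      rw [ih (n / 10) _ hpos hdec, Nat.digits_def' (by norm_num) h0]
      simp

theorem toChars_pos (n : Int) (h : 0 < n) :
    PySem.Int.toChars n = ((Nat.digits 10 n.toNat).map Nat.digitChar).reverse := by
  unfold PySem.Int.toChars
  rw [if_neg (by omega), Nat.toDigits]
  have := toDigitsCore_eq (n.toNat + 1) n.toNat [] (by omega) (by omega)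
  simpa using this

theorem strDigits_eq (n : Int) (h : 0 < n) :
    (PySem.Int.toStr n).toList.map digitVal
      = ((Nat.digits 10 n.toNat).map (fun (d : Nat) => (d : Int))).reverse := by
  rw [PySem.Int.toList_toStr, toChars_pos n h, List.map_reverse, List.map_map]
  congr 1
  apply List.map_congr_left
  intro d hd
  exact digitVal_digitChar d (Nat.digits_lt_base (by norm_num) hd)

theorem fA_iff (n : Int) (h : 0 < n) :
    f n = true ↔ (Nat.digits 10 n.toNat).Nodup ∧
      ∀ d ∈ Nat.digits 10 n.toNat, d ≠ 0 ∧ PySem.Int.mod n (d : Int) = 0 := by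
  rw [f_eq_true_iff, strDigits_eq n h]
  have hinj : Function.Injective (fun (d : Nat) => (d : Int)) := fun a b hab => by
    simpa using hab
  rw [List.nodup_reverse, List.nodup_map_iff hinj]
  simp only [List.mem_reverse, List.mem_map]
  constructor
  · rintro ⟨hnd, hall⟩
    refine ⟨hnd, fun d hd => ?_⟩
    have := hall (d : Int) ⟨d, hd, rfl⟩
    exact ⟨fun h0 => this.1 (by exact_mod_cast h0), this.2⟩
  · rintro ⟨hnd, hall⟩
    refine ⟨hnd, fun x hx => ?_⟩
    obtain ⟨d, hd, rfl⟩ := hx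
    have := hall d hd
    exact ⟨by exact_mod_cast this.1, this.2⟩

-- ---- B-side lemmas ----

theorem gcdLoop_natCast : ∀ (x g : Nat), gcdLoop (g : Int) (x : Int) = (Nat.gcd g x : Int) := by
  intro x
  induction x using Nat.strong_induction_on with
  | _ x ih =>
    intro g
    rw [gcdLoop]
    by_cases hx : (x : Int) = 0
    · have : x = 0 := by exact_mod_cast hx
      subst this; simp
    · have hxpos : 0 < x := Nat.pos_of_ne_zero (by exact_mod_cast hx)
      rw [dif_neg hx, PySem.Int.mod_natCast]
      rw [ih (g % x) (Nat.mod_lt _ (by omega)) x]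
      congr 1
      rw [Nat.gcd_comm x, ← Nat.gcd_rec, Nat.gcd_comm]

theorem foldl_lcm_dvd (D : List Nat) : ∀ (a k : Nat),
    (D.foldl Nat.lcm a ∣ k ↔ a ∣ k ∧ ∀ d ∈ D, d ∣ k) := by
  induction D with
  | nil => intro a k; simp
  | cons x D ih =>
    intro a k
    simp only [List.foldl_cons]
    rw [ih, Nat.lcm_dvd_iff]
    constructor
    · rintro ⟨⟨ha, hx⟩, hD⟩
      refine ⟨ha, fun d hd => ?_⟩
      rcases List.mem_cons.mp hd with rfl | hd'
      · exact hx
      · exact hD d hd'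
    · rintro ⟨ha, h⟩
      exact ⟨⟨ha, h x (by simp)⟩, fun d hd => h d (List.mem_cons_of_mem _ hd)⟩

theorem band_two_pow (mk k : Nat) :
    PySem.Int.band (mk : Int) ((1:Int) <<< k) = (((mk.testBit k).toNat * 2 ^ k : Nat) : Int) := by
  have h1 : ((1:Int) <<< k) = ((2 ^ k : Nat) : Int) := by
    rw [Int.shiftLeft_eq, one_mul]; push_cast; ring
  rw [h1, PySem.Int.band_natCast, Nat.and_two_pow]

theorem bor_two_pow (mk k : Nat) :
    PySem.Int.bor (mk : Int) ((1:Int) <<< k) = ((mk ||| 2 ^ k : Nat) : Int) := by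
  have h1 : ((1:Int) <<< k) = ((2 ^ k : Nat) : Int) := by
    rw [Int.shiftLeft_eq, one_mul]; push_cast; ring
  rw [h1, PySem.Int.bor_natCast]

theorem fAltGo_iff (n : Int) : ∀ (fuel m : Nat), 0 < m → m < fuel →
    ∀ (mk lN : Nat) (S : List Nat), 0 < lN →
    (∀ j, mk.testBit j = true ↔ j ∈ S) →
    (fAltGo n fuel (mk : Int) (lN : Int) (m : Int) = true ↔
      ((Nat.digits 10 m).Nodup ∧ (∀ d ∈ Nat.digits 10 m, d ≠ 0 ∧ d ∉ S) ∧
        PySem.Int.mod n (((Nat.digits 10 m).foldl Nat.lcm lN : Nat) : Int) = 0)) := by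
  intro fuel
  induction fuel with
  | zero => intro m h0 hlt; omega
  | succ fuel ih =>
    intro m h0 hlt mk lN S hl hmask
    have hmod : PySem.Int.mod ((m : Nat) : Int) 10 = ((m % 10 : Nat) : Int) := by
      exact_mod_cast PySem.Int.mod_natCast m 10
    have hdiv : PySem.Int.floordiv ((m : Nat) : Int) 10 = ((m / 10 : Nat) : Int) := by
      exact_mod_cast PySem.Int.floordiv_natCast m 10
    have hdig : Nat.digits 10 m = m % 10 :: Nat.digits 10 (m / 10) :=
      Nat.digits_def' (by norm_num) h0
    rw [fAltGo]
    simp only [hmod, hdiv, Int.toNat_natCast, band_two_pow]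
    by_cases hz : m % 10 = 0
    · rw [if_pos (by simp [hz])]
      simp only [Bool.false_eq_true, false_iff]
      intro hR
      exact (hR.2.1 0 (by rw [hdig, hz]; exact List.mem_cons_self ..)).1 rfl
    · by_cases hb : mk.testBit (m % 10) = true
      · rw [if_pos (by rw [hb]; simp)]
        simp only [Bool.false_eq_true, false_iff]
        intro hR
        exact (hR.2.1 (m % 10) (by rw [hdig]; exact List.mem_cons_self ..)).2 ((hmask _).mp hb)
      · have hbf : mk.testBit (m % 10) = false := by simpa using hb
        rw [if_neg (by simp [hbf]; omega)]
        have hnS : m % 10 ∉ S := fun hm => by rw [(hmask _).mpr hm] at hbf; exact absurd hbf (by simp)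
        have hgcd : gcdLoop ((lN : Nat) : Int) ((m % 10 : Nat) : Int)
            = ((Nat.gcd lN (m % 10) : Nat) : Int) := gcdLoop_natCast (m % 10) lN
        have hlcm : PySem.Int.floordiv (((lN : Nat) : Int) * ((m % 10 : Nat) : Int))
            (gcdLoop ((lN : Nat) : Int) ((m % 10 : Nat) : Int))
            = ((Nat.lcm lN (m % 10) : Nat) : Int) := by
          rw [hgcd]
          have hmul : ((lN : Nat) : Int) * ((m % 10 : Nat) : Int)
              = ((lN * (m % 10) : Nat) : Int) := by push_cast; ring
          rw [hmul, PySem.Int.floordiv_natCast]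
          congr 1
        rw [hlcm]
        by_cases hq0 : m / 10 = 0
        · rw [if_pos (by simp [hq0])]
          rw [hdig, hq0, Nat.digits_zero]
          rw [List.foldl_cons, List.foldl_nil]
          simp only [decide_eq_true_eq]
          constructor
          · intro hm
            refine ⟨by simp, ?_, hm⟩
            intro d hd
            rw [List.mem_singleton] at hd
            subst hd
            exact ⟨hz, hnS⟩
          · exact fun hR => hR.2.2
        · rw [if_neg (by simp only [beq_iff_eq]; exact_mod_cast hq0)]
          rw [bor_two_pow]
          have hq0' : 0 < m / 10 := Nat.pos_of_ne_zero hq0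
          have hqlt : m / 10 < fuel := by
            have := Nat.div_lt_self h0 (by norm_num : (1:Nat) < 10)
            omega
          have hmask' : ∀ j, (mk ||| 2 ^ (m % 10)).testBit j = true ↔ j ∈ (m % 10) :: S := by
            intro j
            rw [Nat.testBit_or, Nat.testBit_two_pow]
            simp only [Bool.or_eq_true, decide_eq_true_eq, List.mem_cons]
            rw [hmask j]
            constructor
            · rintro (h | h)
              · exact Or.inr h
              · exact Or.inl h.symm
            · rintro (h | h)
              · exact Or.inr h.symm
              · exact Or.inl h
          rw [ih (m / 10) hq0' hqlt (mk ||| 2 ^ (m % 10)) (Nat.lcm lN (m % 10))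
            ((m % 10) :: S) (Nat.lcm_pos hl (Nat.pos_of_ne_zero hz)) hmask']
          rw [hdig, List.foldl_cons, List.nodup_cons, List.forall_mem_cons]
          constructor
          · rintro ⟨hnd, hall, hm⟩
            refine ⟨⟨fun hmem => (hall _ hmem).2 (by simp), hnd⟩,
              ⟨⟨hz, hnS⟩, fun d hd => ⟨(hall d hd).1,
                fun hdS => (hall d hd).2 (List.mem_cons_of_mem _ hdS)⟩⟩, hm⟩
          · rintro ⟨⟨hnmem, hnd⟩, hx, hm⟩
            refine ⟨hnd, fun d hd => ⟨(hx.2 d hd).1, fun hdc => ?_⟩, hm⟩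
            rcases List.mem_cons.mp hdc with rfl | hdS
            · exact hnmem hd
            · exact (hx.2 d hd).2 hdS

-- ---- main equivalence ----

theorem f_eq_f_alt (n : Int) (hn : 0 ≤ n) : f n = f_alt n := by
  rcases eq_or_lt_of_le hn with h | h
  · rw [← h]; decide
  · have hN : ((n.toNat : Nat) : Int) = n := Int.toNat_of_nonneg hn
    have hfa : f_alt n
        = fAltGo n (n.toNat + 1) (((0:Nat) : Nat) : Int) (((1:Nat) : Nat) : Int)
            ((n.toNat : Nat) : Int) := by
      unfold f_alt
      have h1 : n.natAbs = n.toNat := by omega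
      rw [h1, hN]
      norm_num
    have hB := fAltGo_iff n (n.toNat + 1) n.toNat (by omega) (by omega) 0 1 []
      one_pos (by simp)
    have hA := fA_iff n h
    have hdvd : ∀ L : Nat, (PySem.Int.mod n ((L : Nat) : Int) = 0 ↔ L ∣ n.toNat) := by
      intro L
      rw [PySem.Int.mod_eq_zero_iff_dvd, ← hN, Int.natCast_dvd_natCast, Int.toNat_natCast]
    have hX : f n = true ↔ f_alt n = true := by
      rw [hA, hfa, hB]
      constructor
      · rintro ⟨hnd, hall⟩
        refine ⟨hnd, fun d hd => ⟨(hall d hd).1, by simp⟩, ?_⟩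
        rw [hdvd, foldl_lcm_dvd]
        exact ⟨one_dvd _, fun d hd => (hdvd d).mp (hall d hd).2⟩
      · rintro ⟨hnd, hall, hm⟩
        rw [hdvd, foldl_lcm_dvd] at hm
        exact ⟨hnd, fun d hd => ⟨(hall d hd).1, (hdvd d).mpr (hm.2 d hd)⟩⟩
    cases hf : f n <;> cases hg : f_alt n <;> simp_all

-- ===== VERDICT (by name: the statement is the Claim_ definition above) =====
theorem f_spec : Claim_equal_f := by
  intro n _ hpre
  unfold Spec_f
  exact f_eq_f_alt n hpre
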